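-- pv_equiv track=rewrite | github.com/moustapha205/python_exercise | serie7/serie7-exercice10.py | calculer_totaux_semaines
-- ===== SOURCE A (Python) =====
-- def calculer_totaux_semaines(revenus, taille_semaine=7):
--     totaux_semaines = []
--     labels_semaines = []
--     for i in range(0, len(revenus), taille_semaine):
--         bloc = revenus[i:i+taille_semaine]
--         if len(bloc) > 0:
--             totaux_semaines.append(sum(bloc))
--             labels_semaines.append(f"S{i//taille_semaine + 1}")
--     return labels_semaines, totaux_semaines
-- ===== SOURCE B (Python) =====
-- def calculer_totaux_semaines(revenus, taille_semaine=7):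
--     labels_semaines = []
--     totaux_semaines = []
--     for i, r in enumerate(revenus):
--         if i % taille_semaine == 0:
--             labels_semaines.append(f"S{i // taille_semaine + 1}")
--             totaux_semaines.append(0)
--         totaux_semaines[-1] += r
--     return labels_semaines, totaux_semaines
-- ===== Notes on version B (the rewrite author's own statement) =====
-- stated objective: alternative
-- what changed: Replaces the slice-per-week loop (range with step + list slicing + sum per block) by a single linear pass over enumerate(revenus) that starts a new label/accumulator whenever the index is a multiple of taille_semaine; Pre_ excludes taille_semaine <= 0, where A raises ValueError (zero step) or returns an empty result that is an accident of range's negative-step semantics and no weekly grouping is meaningful.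
-- outside the precondition, e.g. on calculer_totaux_semaines([1, 2], -2): A returns ([], []), B returns (['S1'], [3])
import Mathlib
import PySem

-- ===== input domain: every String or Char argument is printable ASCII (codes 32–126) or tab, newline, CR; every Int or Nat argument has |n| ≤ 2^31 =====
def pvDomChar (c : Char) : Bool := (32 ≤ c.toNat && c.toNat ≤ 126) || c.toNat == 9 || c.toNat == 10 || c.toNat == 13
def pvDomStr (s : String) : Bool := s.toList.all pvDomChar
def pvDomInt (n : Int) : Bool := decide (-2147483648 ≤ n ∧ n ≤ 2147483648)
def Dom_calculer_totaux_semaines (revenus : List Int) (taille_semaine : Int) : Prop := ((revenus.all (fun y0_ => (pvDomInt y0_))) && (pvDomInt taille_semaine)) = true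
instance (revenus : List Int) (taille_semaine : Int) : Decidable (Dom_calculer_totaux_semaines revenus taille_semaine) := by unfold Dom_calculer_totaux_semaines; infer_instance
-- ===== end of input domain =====

-- B replaces A's slice-per-week loop by a single linear pass over enumerate(revenus)
-- with a running last-block accumulator (alternative decomposition, same cost).


-- ===== PORT A =====
-- loop body of A's 'for i in range(0, len(revenus), taille_semaine)'; state = (totaux_semaines, labels_semaines)
def pvStepA (revenus : List Int) (taille_semaine : Int) (st : List Int × List String) (i : Int) : List Int × List String :=
  let bloc := PySem.List.slice revenus (some i) (some (i + taille_semaine))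
  if 0 < bloc.length then
    (st.1 ++ [bloc.sum], st.2 ++ ["S" ++ PySem.Int.toStr (PySem.Int.floordiv i taille_semaine + 1)])
  else st

def calculer_totaux_semaines (revenus : List Int) (taille_semaine : Int) : List String × List Int :=
  let st := (PySem.List.pyRange 0 (revenus.length : Int) taille_semaine).foldl (pvStepA revenus taille_semaine) ([], [])
  (st.2, st.1)

-- ===== PORT B =====
-- totaux_semaines[-1] += r  (empty case unreachable: a block is opened at i = 0 before any add)
def pvAddLast : List Int → Int → List Int
  | [], _ => []
  | [x], r => [x + r]
  | x :: xs, r => x :: pvAddLast xs r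

-- loop body of B's 'for i, r in enumerate(revenus)'; state = (labels_semaines, totaux_semaines)
def pvStepB (taille_semaine : Int) (st : List String × List Int) (p : Int × Int) : List String × List Int :=
  let st' :=
    if PySem.Int.mod p.1 taille_semaine = 0 then
      (st.1 ++ ["S" ++ PySem.Int.toStr (PySem.Int.floordiv p.1 taille_semaine + 1)], st.2 ++ [(0 : Int)])
    else st
  (st'.1, pvAddLast st'.2 p.2)

def calculer_totaux_semaines_alt (revenus : List Int) (taille_semaine : Int) : List String × List Int :=
  (PySem.List.enumerate revenus 0).foldl (pvStepB taille_semaine) ([], [])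

-- ===== PRECONDITION & SPEC =====
-- Pre_ excludes taille_semaine ≤ 0: at 0 A's range(0, len, 0) raises ValueError, and for a
-- negative step A's empty result is an accident of range's negative-step semantics — no weekly
-- grouping is meaningful there, and B's linear pass produces a different (equally meaningless) value.
def Pre_calculer_totaux_semaines (revenus : List Int) (taille_semaine : Int) : Prop := 1 ≤ taille_semaine
instance (revenus : List Int) (taille_semaine : Int) : Decidable (Pre_calculer_totaux_semaines revenus taille_semaine) := by unfold Pre_calculer_totaux_semaines; infer_instance
def pvWitness_calculer_totaux_semaines : List Int × Int := ([1, 2, 3], 2)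

def Spec_calculer_totaux_semaines (revenus : List Int) (taille_semaine : Int) (out : List String × List Int) : Prop := out = calculer_totaux_semaines_alt revenus taille_semaine
instance (revenus : List Int) (taille_semaine : Int) (out : List String × List Int) : Decidable (Spec_calculer_totaux_semaines revenus taille_semaine out) := by unfold Spec_calculer_totaux_semaines; infer_instance

-- ===== CLAIM (what is proved, stated in full; the proofs are below) =====
def Claim_equal_calculer_totaux_semaines : Prop := ∀ (revenus : List Int) (taille_semaine : Int), Dom_calculer_totaux_semaines revenus taille_semaine → Pre_calculer_totaux_semaines revenus taille_semaine → Spec_calculer_totaux_semaines revenus taille_semaine (calculer_totaux_semaines revenus taille_semaine)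

-- ===== LEMMAS AND PROOFS =====

-- common recursive specification: per-week labels and block sums, week counter k
def pvWeeks (t : Int) (k : Int) (rs : List Int) : List String × List Int :=
  if _hr : rs = [] then ([], [])
  else if ht : 1 ≤ t then
    let rest := pvWeeks t (k + 1) (rs.drop t.toNat)
    (("S" ++ PySem.Int.toStr (k + 1)) :: rest.1, (rs.take t.toNat).sum :: rest.2)
  else ([], [])
termination_by rs.length
decreasing_by
  simp only [List.length_drop]
  cases rs with
  | nil => exact absurd rfl _hr
  | cons a l => simp; omega

theorem pvWeeks_nil (t k : Int) : pvWeeks t k [] = ([], []) := by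
  unfold pvWeeks; simp

theorem pvWeeks_cons (t k : Int) (rs : List Int) (hr : rs ≠ []) (ht : 1 ≤ t) :
    pvWeeks t k rs =
      (("S" ++ PySem.Int.toStr (k + 1)) :: (pvWeeks t (k + 1) (rs.drop t.toNat)).1,
       (rs.take t.toNat).sum :: (pvWeeks t (k + 1) (rs.drop t.toNat)).2) := by
  rw [pvWeeks]; simp [hr, ht]

theorem pvRange_pos_cons (a b t : Int) (ht : 0 < t) (hab : a < b) :
    PySem.List.pyRange a b t = a :: PySem.List.pyRange (a + t) b t := by
  rw [PySem.List.pyRange_of_pos a b ht, PySem.List.pyRange_of_pos (a + t) b ht]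
  have h1 : b - a + t - 1 = (b - a - 1) + 1 * t := by ring
  have h2 : (b - a - 1) / t ≥ 0 := Int.ediv_nonneg (by omega) (by omega)
  have h3 : (b - a + t - 1) / t = (b - a - 1) / t + 1 := by
    rw [h1, Int.add_mul_ediv_right _ _ (by omega : t ≠ 0)]
  by_cases hb : a + t < b
  · have h4 : b - (a + t) + t - 1 = b - a - 1 := by ring
    have h5 : ((b - a + t - 1) / t).toNat = ((b - a - 1) / t).toNat + 1 := by
      rw [h3]; omega
    simp only [if_pos hab, if_pos hb, h4, h5, List.range_succ_eq_map]
    simp [List.map_map, Function.comp]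
    intro k _
    ring
  · have h6 : (b - a - 1) / t = 0 := Int.ediv_eq_zero_of_lt (by omega) (by omega)
    have h5 : ((b - a + t - 1) / t).toNat = 1 := by rw [h3, h6]; rfl
    simp only [if_pos hab, if_neg hb, h5]
    simp

theorem pvAddLast_append (xs : List Int) (c r : Int) :
    pvAddLast (xs ++ [c]) r = xs ++ [c + r] := by
  induction xs with
  | nil => simp [pvAddLast]
  | cons a l ih =>
    cases l with
    | nil => simp [pvAddLast]
    | cons b m => simp only [List.cons_append, pvAddLast] at ih ⊢; rw [ih]

-- inner run of B within a week: no index is a multiple of t, so only the last total grows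
theorem pvInnerB (t : Int) (ht : 0 < t) (ys : List Int) :
    ∀ (s : Int) (lab : List String) (tot : List Int) (c : Int),
      (∀ j : Nat, j < ys.length → PySem.Int.mod (s + j) t ≠ 0) →
      (PySem.List.enumerate ys s).foldl (pvStepB t) (lab, tot ++ [c]) = (lab, tot ++ [c + ys.sum]) := by
  induction ys with
  | nil => intro s lab tot c _; simp [PySem.List.enumerate_nil]
  | cons y ys ih =>
    intro s lab tot c hj
    rw [PySem.List.enumerate_cons, List.foldl_cons]
    have h0 : PySem.Int.mod s t ≠ 0 := by
      have := hj 0 (by simp)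
      simpa using this
    have hstep : pvStepB t (lab, tot ++ [c]) (s, y) = (lab, tot ++ [c + y]) := by
      simp only [pvStepB, if_neg h0]
      rw [pvAddLast_append]
    rw [hstep]
    rw [ih (s + 1) lab tot (c + y) (fun j hjl => by
      have := hj (j + 1) (by simpa using Nat.succ_lt_succ hjl)
      have harg : s + 1 + (j : Int) = s + ((j : Nat) + 1 : Nat) := by push_cast; ring
      rw [harg]; exact this)]
    simp [List.sum_cons]
    ring_nf

-- arithmetic helpers
theorem pvMod_mul (k t : Int) (ht : 0 < t) : PySem.Int.mod (k * t) t = 0 := by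
  rw [PySem.Int.mod_eq_zero_iff_dvd]; exact dvd_mul_left t k

theorem pvFloordiv_mul (k t : Int) (ht : 0 < t) : PySem.Int.floordiv (k * t) t = k := by
  rw [PySem.Int.floordiv_eq_ediv_of_pos ht]
  exact Int.mul_ediv_cancel k (by omega)

theorem pvMod_mid (k t j : Int) (ht : 0 < t) (hj0 : 0 < j) (hjt : j < t) :
    PySem.Int.mod (k * t + j) t ≠ 0 := by
  rw [PySem.Int.mod_eq_emod_of_pos ht]
  have : (k * t + j) % t = j := by
    have h1 : k * t + j = j + t * k := by ring
    rw [h1, Int.add_mul_emod_self_left, Int.emod_eq_of_lt (by omega) hjt]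
  omega

-- B's fold over a whole suffix starting at week k equals pvWeeks
theorem pvFoldB_weeks (t : Int) (ht : 0 < t) :
    ∀ (m : Nat) (rs : List Int), rs.length = m → ∀ (k : Int), 0 ≤ k → ∀ (lab : List String) (tot : List Int),
      (PySem.List.enumerate rs (k * t)).foldl (pvStepB t) (lab, tot)
        = (lab ++ (pvWeeks t k rs).1, tot ++ (pvWeeks t k rs).2) := by
  intro m
  induction m using Nat.strong_induction_on with
  | _ m ih =>
    intro rs hm k hk lab tot
    cases rs with
    | nil => simp [PySem.List.enumerate_nil, pvWeeks_nil]
    | cons r rs' =>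
      have ht1 : 1 ≤ t := by omega
      have htn : 1 ≤ t.toNat := by omega
      rw [PySem.List.enumerate_cons, List.foldl_cons]
      have hstep : pvStepB t (lab, tot) (k * t, r)
          = (lab ++ ["S" ++ PySem.Int.toStr (PySem.Int.floordiv (k * t) t + 1)], tot ++ [r]) := by
        simp only [pvStepB, if_pos (pvMod_mul k t ht)]
        simp [pvAddLast_append]
      rw [hstep, pvFloordiv_mul k t ht]
      -- split rs' into the rest of this week and the later weeks
      set ys := rs'.take (t.toNat - 1) with hys
      set zs := rs'.drop (t.toNat - 1) with hzs
      have hsplit : rs' = ys ++ zs := (List.take_append_drop _ _).symm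
      have hylen : ys.length ≤ t.toNat - 1 := by simp [hys]
      conv_lhs => rw [hsplit]
      rw [PySem.List.enumerate_append, List.foldl_append]
      rw [pvInnerB t ht ys (k * t + 1) _ tot r (by
        intro j hjl
        have harg : k * t + 1 + (j : Int) = k * t + (1 + (j : Int)) := by ring
        rw [harg]
        exact pvMod_mid k t (1 + (j : Int)) ht (by omega) (by omega))]
      have hsum : r + ys.sum = ((r :: rs').take t.toNat).sum := by
        have : (r :: rs').take t.toNat = r :: ys := by
          have : t.toNat = (t.toNat - 1) + 1 := by omega
          rw [this, List.take_succ_cons, hys]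
        rw [this]; simp
      by_cases hrest : rs'.length ≤ t.toNat - 1
      · have hzs_nil : zs = [] := by simp [hzs]; omega
        have hdrop_nil : (r :: rs').drop t.toNat = [] := by
          simp; omega
        rw [hzs_nil]
        simp only [PySem.List.enumerate_nil, List.foldl_nil]
        rw [pvWeeks_cons t k (r :: rs') (by simp) ht1, hdrop_nil, pvWeeks_nil]
        simp [hsum]
      · have hzlen : ys.length = t.toNat - 1 := by simp [hys]; omega
        have hstart : k * t + 1 + (ys.length : Int) = (k + 1) * t := by
          rw [hzlen]
          have h7 : (k + 1) * t = k * t + t := by ring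
          omega
        rw [hstart]
        have hdrop : zs = (r :: rs').drop t.toNat := by
          rw [hzs]
          conv_rhs => rw [show t.toNat = (t.toNat - 1) + 1 from by omega, List.drop_succ_cons]
        have hzm : zs.length < m := by
          rw [hzs]
          simp at hm ⊢
          omega
        rw [ih zs.length hzm zs rfl (k + 1) (by omega)]
        rw [pvWeeks_cons t k (r :: rs') (by simp) ht1, ← hdrop]
        simp [hsum]

-- A's fold over the ranges from week k equals pvWeeks on the corresponding suffix
theorem pvFoldA_weeks (revenus : List Int) (t : Int) (ht : 0 < t) :
    ∀ (m : Nat) (k : Int), 0 ≤ k → revenus.length - (k * t).toNat = m →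
      ∀ (tot : List Int) (lab : List String),
      (PySem.List.pyRange (k * t) (revenus.length : Int) t).foldl (pvStepA revenus t) (tot, lab)
        = (tot ++ (pvWeeks t k (revenus.drop (k * t).toNat)).2,
           lab ++ (pvWeeks t k (revenus.drop (k * t).toNat)).1) := by
  intro m
  induction m using Nat.strong_induction_on with
  | _ m ih =>
    intro k hk hm tot lab
    have hkt : 0 ≤ k * t := mul_nonneg hk (by omega)
    by_cases hend : (revenus.length : Int) ≤ k * t
    · have hnil : PySem.List.pyRange (k * t) (revenus.length : Int) t = [] := by
        rw [PySem.List.pyRange_of_pos _ _ ht]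
        simp [if_neg (by omega : ¬ k * t < (revenus.length : Int))]
      have hdrop : revenus.drop (k * t).toNat = [] := by
        apply List.drop_eq_nil_of_le; omega
      rw [hnil, hdrop, pvWeeks_nil]
      simp
    · have hlt : k * t < (revenus.length : Int) := by omega
      rw [pvRange_pos_cons _ _ _ ht hlt, List.foldl_cons]
      set rs := revenus.drop (k * t).toNat with hrs
      have hrs_ne : rs ≠ [] := by
        rw [hrs]
        intro hcon
        have := List.drop_eq_nil_iff.mp hcon
        omega
      have hbloc : PySem.List.slice revenus (some (k * t)) (some (k * t + t)) = rs.take t.toNat := by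
        rw [PySem.List.slice_toNat revenus hkt (by omega)]
        have : (k * t + t).toNat - (k * t).toNat = t.toNat := by omega
        rw [this, hrs]
      have hlen : 0 < (rs.take t.toNat).length := by
        rw [List.length_take]
        have : rs.length ≠ 0 := fun h => hrs_ne (List.eq_nil_of_length_eq_zero h)
        omega
      have hstep : pvStepA revenus t (tot, lab) (k * t)
          = (tot ++ [(rs.take t.toNat).sum],
             lab ++ ["S" ++ PySem.Int.toStr (PySem.Int.floordiv (k * t) t + 1)]) := by
        simp only [pvStepA, hbloc, if_pos hlen]
      rw [hstep, pvFloordiv_mul k t ht]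
      have hnext : k * t + t = (k + 1) * t := by ring
      rw [hnext]
      have hdec : revenus.length - ((k + 1) * t).toNat < m := by
        have h1 : (k + 1) * t = k * t + t := by ring
        omega
      rw [ih _ hdec (k + 1) (by omega) rfl]
      have hdd : revenus.drop ((k + 1) * t).toNat = rs.drop t.toNat := by
        rw [hrs, List.drop_drop]
        congr 1
        omega
      rw [hdd, pvWeeks_cons t k rs hrs_ne (by omega)]
      simp

-- ===== VERDICT (by name: the statement is the Claim_ definition above) =====
theorem calculer_totaux_semaines_spec : Claim_equal_calculer_totaux_semaines := by
  intro revenus t _ hpre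
  have ht : 0 < t := hpre
  unfold Spec_calculer_totaux_semaines calculer_totaux_semaines calculer_totaux_semaines_alt
  have hA := pvFoldA_weeks revenus t ht (revenus.length - ((0 : Int) * t).toNat) 0 le_rfl rfl [] []
  have hB := pvFoldB_weeks t ht revenus.length revenus rfl 0 le_rfl [] []
  simp only [zero_mul] at hA hB
  simp only [hA, hB]
  simp
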